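-- pv_equiv track=rewrite | github.com/david-busbib/Nand2Tetris | 11/JackTokenizer.py | arrange_line
-- ===== SOURCE A (Python) =====
-- def arrange_line(cur):
--     modified_string = ''.join(char if char
--                                       not in
--                                       ['{', '}', '(', ')', '[', ']', '.', ',', ';', '+', '-', '*', '/', '&', '|',
--                                        '<', '>', '=', '~']
--                               else f' {char} ' for char in cur)
--     result =[]
--     for i in modified_string.split(' ') :
--         if i and i.startswith("#") or i.startswith("^"):
--             result.append(i[0])
--             result.append(i[1:])
--         else :
--             if i:
--                 result.append(i)
--     return result
-- ===== SOURCE B (Python) =====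
-- def arrange_line(cur):
--     symbols = "{}()[].,;+-*/&|<>=~"
--     tokens = []
--     buf = ""
--
--     def flush(t):
--         if t and t[0] in "#^":
--             tokens.append(t[0])
--             tokens.append(t[1:])
--         elif t:
--             tokens.append(t)
--
--     for ch in cur:
--         if ch in symbols:
--             flush(buf)
--             buf = ""
--             tokens.append(ch)
--         elif ch == ' ':
--             flush(buf)
--             buf = ""
--         else:
--             buf += ch
--     flush(buf)
--     return tokens
-- ===== Notes on version B (the rewrite author's own statement) =====
-- stated objective: faster
-- what changed: Replaces A's build-padded-string-then-split-then-rescan pipeline by a single-pass character scanner with a token buffer and a flush helper, never materialising the intermediate string or the split pieces.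
import Mathlib
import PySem

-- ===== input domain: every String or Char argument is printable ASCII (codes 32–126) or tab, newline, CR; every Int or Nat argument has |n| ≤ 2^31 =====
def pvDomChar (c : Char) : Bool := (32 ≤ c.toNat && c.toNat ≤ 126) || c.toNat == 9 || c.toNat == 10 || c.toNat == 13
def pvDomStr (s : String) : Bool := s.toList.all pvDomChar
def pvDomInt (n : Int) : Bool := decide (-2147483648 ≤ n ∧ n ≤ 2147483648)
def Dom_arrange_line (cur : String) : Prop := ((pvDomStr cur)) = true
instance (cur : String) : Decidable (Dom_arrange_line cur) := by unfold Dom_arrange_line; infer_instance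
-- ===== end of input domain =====

-- B replaces A's join/split/rescan pipeline by a single-pass scanner with a token buffer (constant-factor mechanism: no intermediate string or piece list); return values proved equal.


-- ===== PORT A =====
-- the 19 symbol characters from A's list literal
def pvSymbolsA : List Char :=
  ['{', '}', '(', ')', '[', ']', '.', ',', ';', '+', '-', '*', '/', '&', '|', '<', '>', '=', '~']

-- the generator expression: char if char not in [...] else f' {char} '
def pvExpand (c : Char) : List Char := if c ∈ pvSymbolsA then [' ', c, ' '] else [c]

-- the body of A's `for i in modified_string.split(' ')` loop.
-- i[0] is written i.take 1: under the branch guard i is nonempty, so [i[0]] = i.take 1 exactly.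
def pvStepA (result : List String) (i : List Char) : List String :=
  if (decide (i ≠ []) && PySem.Chars.startswith i ['#']) || PySem.Chars.startswith i ['^'] then
    result ++ [String.ofList (i.take 1), String.ofList (PySem.Chars.slice i (some 1) none)]
  else
    if decide (i ≠ []) then result ++ [String.ofList i] else result

-- ''.join(...) of the per-character pieces = flatMap of the pieces (join with empty separator)
def arrange_line (cur : String) : List String :=
  (PySem.Chars.splitOn (cur.toList.flatMap pvExpand) [' ']).foldl pvStepA []

-- ===== PORT B =====
def pvSymbolsB : List Char := "{}()[].,;+-*/&|<>=~".toList

-- Source B's flush(t)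
def pvFlush (tokens : List String) (t : List Char) : List String :=
  match t with
  | c :: rest =>
      if c ∈ ['#', '^'] then tokens ++ [String.ofList [c], String.ofList rest]
      else tokens ++ [String.ofList (c :: rest)]
  | [] => tokens

-- Source B's loop body over the state (tokens, buf)
def pvScanStep (st : List String × List Char) (c : Char) : List String × List Char :=
  if c ∈ pvSymbolsB then (pvFlush st.1 st.2 ++ [String.ofList [c]], [])
  else if c = ' ' then (pvFlush st.1 st.2, [])
  else (st.1, st.2 ++ [c])

def arrange_line_alt (cur : String) : List String :=
  pvFlush (cur.toList.foldl pvScanStep ([], [])).1 (cur.toList.foldl pvScanStep ([], [])).2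

-- ===== PRECONDITION & SPEC =====
def Spec_arrange_line (cur : String) (out : List String) : Prop := out = arrange_line_alt cur
instance (cur : String) (out : List String) : Decidable (Spec_arrange_line cur out) := by unfold Spec_arrange_line; infer_instance

-- ===== CLAIM (what is proved, stated in full; the proofs are below) =====
def Claim_equal_arrange_line : Prop := ∀ (cur : String), Dom_arrange_line cur → Spec_arrange_line cur (arrange_line cur)

-- ===== LEMMAS AND PROOFS =====

-- PySem.Chars.splitOn on the one-character separator [' '] is Mathlib's List.splitOn ' '
theorem pv_go_splitOn (fuel : Nat) : ∀ (l cur : List Char) (acc : List (List Char)),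
    l.length ≤ fuel →
    PySem.Chars.splitOn.go [' '] fuel l cur acc
      = acc.reverse ++ List.modifyHead (cur.reverse ++ ·) (l.splitOn ' ') := by
  induction fuel with
  | zero =>
    intro l cur acc h
    have hl : l = [] := List.eq_nil_of_length_eq_zero (Nat.le_zero.mp h)
    subst hl
    simp [PySem.Chars.splitOn.go, List.splitOn]
  | succ n ih =>
    intro l cur acc h
    cases l with
    | nil => simp [PySem.Chars.splitOn.go, List.splitOn]
    | cons c rest =>
      by_cases hc : c = ' '
      · subst hc
        rw [show PySem.Chars.splitOn.go [' '] (n+1) (' ' :: rest) cur acc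
              = PySem.Chars.splitOn.go [' '] n rest [] (cur.reverse :: acc) by
            simp [PySem.Chars.splitOn.go, List.isPrefixOf]]
        rw [ih rest [] (cur.reverse :: acc) (Nat.lt_succ_iff.mp (by simpa using h))]
        obtain ⟨p, t, hpt⟩ := List.exists_cons_of_ne_nil (List.splitOnP_ne_nil (· == ' ') rest)
        simp [List.splitOn, List.splitOnP_cons, hpt]
      · have hc' : ¬ (' ' = c) := fun hh => hc hh.symm
        rw [show PySem.Chars.splitOn.go [' '] (n+1) (c :: rest) cur acc
              = PySem.Chars.splitOn.go [' '] n rest (c :: cur) acc by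
            simp [PySem.Chars.splitOn.go, List.isPrefixOf, hc']]
        rw [ih rest (c :: cur) acc (Nat.lt_succ_iff.mp (by simpa using h))]
        obtain ⟨p, t, hpt⟩ := List.exists_cons_of_ne_nil (List.splitOnP_ne_nil (· == ' ') rest)
        simp [List.splitOn, List.splitOnP_cons, hpt, hc]

theorem pv_splitOn_eq (l : List Char) :
    PySem.Chars.splitOn l [' '] = l.splitOn ' ' := by
  rw [PySem.Chars.splitOn, pv_go_splitOn (l.length + 1) l [] [] (Nat.le_succ _)]
  obtain ⟨p, t, hpt⟩ := List.exists_cons_of_ne_nil (List.splitOnP_ne_nil (· == ' ') l)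
  simp only [List.splitOn] at hpt ⊢
  simp [hpt]

-- a space-free list splits to itself
theorem pv_splitOn_no_space (xs : List Char) (h : ' ' ∉ xs) : xs.splitOn ' ' = [xs] := by
  induction xs with
  | nil => simp [List.splitOn]
  | cons c rest ih =>
    have hc : c ≠ ' ' := fun hh => h (hh ▸ List.mem_cons_self ..)
    have hrec := ih (fun hm => h (List.mem_cons_of_mem _ hm))
    simp only [List.splitOn] at hrec ⊢
    simp [List.splitOnP_cons, hc, hrec]

-- splitting off the first space
theorem pv_splitOn_append (xs ys : List Char) (h : ' ' ∉ xs) :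
    (xs ++ ' ' :: ys).splitOn ' ' = xs :: ys.splitOn ' ' := by
  induction xs with
  | nil => simp [List.splitOn, List.splitOnP_cons]
  | cons c rest ih =>
    have hc : c ≠ ' ' := fun hh => h (hh ▸ List.mem_cons_self ..)
    have hrec := ih (fun hm => h (List.mem_cons_of_mem _ hm))
    simp only [List.splitOn] at hrec ⊢
    simp [List.splitOnP_cons, hc, hrec]

-- B's flush IS A's loop body
theorem pv_flush_eq_stepA (out : List String) (buf : List Char) :
    pvFlush out buf = pvStepA out buf := by
  cases buf with
  | nil => simp [pvFlush, pvStepA, PySem.Chars.startswith]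
  | cons c rest =>
    by_cases h1 : c = '#'
    · subst h1
      simp [pvFlush, pvStepA, PySem.Chars.startswith, List.isPrefixOf, PySem.List.slice_from]
    · by_cases h2 : c = '^'
      · subst h2
        simp [pvFlush, pvStepA, PySem.Chars.startswith, List.isPrefixOf, PySem.List.slice_from]
      · have h1' : ¬ ('#' = c) := fun hh => h1 hh.symm
        have h2' : ¬ ('^' = c) := fun hh => h2 hh.symm
        simp [pvFlush, pvStepA, PySem.Chars.startswith, List.isPrefixOf, h1, h2, h1', h2']

theorem pv_symbols_eq : pvSymbolsB = pvSymbolsA := by decide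

theorem pv_stepA_symbol (out : List String) (c : Char) (h : c ∈ pvSymbolsA) :
    pvStepA out [c] = out ++ [String.ofList [c]] := by
  fin_cases h <;> simp [pvStepA, PySem.Chars.startswith, List.isPrefixOf]

theorem pv_symbol_ne_space (c : Char) (h : c ∈ pvSymbolsA) : c ≠ ' ' := by
  fin_cases h <;> decide

-- main invariant: the scanner over the rest of the line, started with a space-free buffer,
-- computes A's fold over the split of (buffer ++ expansion of the rest)
theorem pv_scan_inv (l : List Char) : ∀ (out : List String) (buf : List Char), ' ' ∉ buf →
    pvFlush (l.foldl pvScanStep (out, buf)).1 (l.foldl pvScanStep (out, buf)).2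
      = ((buf ++ l.flatMap pvExpand).splitOn ' ').foldl pvStepA out := by
  induction l with
  | nil =>
    intro out buf hb
    simp [pv_splitOn_no_space buf hb, pv_flush_eq_stepA]
  | cons c rest ih =>
    intro out buf hb
    by_cases h1 : c ∈ pvSymbolsA
    · have hb1 : c ∈ pvSymbolsB := pv_symbols_eq ▸ h1
      have hcns : c ≠ ' ' := pv_symbol_ne_space c h1
      simp only [List.foldl_cons, pvScanStep, if_pos hb1]
      rw [ih (pvFlush out buf ++ [String.ofList [c]]) [] (by simp)]
      simp only [List.flatMap_cons, pvExpand, if_pos h1]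
      have e1 : buf ++ ([' ', c, ' '] ++ rest.flatMap pvExpand)
          = buf ++ ' ' :: ([c] ++ ' ' :: rest.flatMap pvExpand) := by simp
      rw [e1, pv_splitOn_append buf _ hb,
          pv_splitOn_append [c] _ (by simpa using fun hh => hcns hh.symm)]
      simp only [List.foldl_cons, List.nil_append]
      rw [pv_flush_eq_stepA, pv_stepA_symbol (pvStepA out buf) c h1]
    · have hb1 : c ∉ pvSymbolsB := fun hh => h1 (pv_symbols_eq ▸ hh)
      by_cases h2 : c = ' '
      · subst h2
        simp only [List.foldl_cons, pvScanStep, if_neg hb1, if_true]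
        rw [ih (pvFlush out buf) [] (by simp)]
        simp only [List.flatMap_cons, pvExpand, if_neg h1]
        rw [show buf ++ ([' '] ++ rest.flatMap pvExpand) = buf ++ ' ' :: rest.flatMap pvExpand by simp]
        rw [pv_splitOn_append buf _ hb]
        simp [pv_flush_eq_stepA]
      · simp only [List.foldl_cons, pvScanStep, if_neg hb1, if_neg h2]
        have hbuf : ' ' ∉ buf ++ [c] := by
          intro hm
          rcases List.mem_append.mp hm with hm | hm
          · exact hb hm
          · exact h2 (List.mem_singleton.mp hm).symm
        rw [ih out (buf ++ [c]) hbuf]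
        simp only [List.flatMap_cons, pvExpand, if_neg h1]
        rw [List.append_assoc]

-- ===== VERDICT (by name: the statement is the Claim_ definition above) =====
theorem arrange_line_spec : Claim_equal_arrange_line := by
  intro cur _
  unfold Spec_arrange_line arrange_line arrange_line_alt
  rw [pv_splitOn_eq]
  exact (pv_scan_inv cur.toList [] [] (by simp)).symm
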